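-- pv_equiv track=rewrite | github.com/oligogenic/bock_rule_mining | src/rule_mining/unification_mining.py | is_unifiable
-- ===== SOURCE A (Python) =====
-- from collections import defaultdict
--
-- def is_unifiable(metapath_set):
--     if len(metapath_set) == 1:
--         return False
--     node_type_to_mp_count = defaultdict(int)
--     for metapath in metapath_set:
--         edge_types, node_types = metapath
--         unique_node_types = set(node_types)
--         for node_type in unique_node_types:
--             node_type_to_mp_count[node_type] += 1
--     return any(i >= 2 for i in node_type_to_mp_count.values())
-- ===== SOURCE B (Python) =====
-- def is_unifiable(metapath_set):
--     seen = set()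
--     for metapath in metapath_set:
--         edge_types, node_types = metapath
--         unique_node_types = set(node_types)
--         for node_type in unique_node_types:
--             if node_type in seen:
--                 return True
--         seen.update(unique_node_types)
--     return False
-- ===== Notes on version B (the rewrite author's own statement) =====
-- stated objective: simpler
-- what changed: Replaces accumulate-counts-then-scan-all-values with a single-pass seen-set duplicate detector that returns True as soon as a node type repeats across metapaths.
import Mathlib
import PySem

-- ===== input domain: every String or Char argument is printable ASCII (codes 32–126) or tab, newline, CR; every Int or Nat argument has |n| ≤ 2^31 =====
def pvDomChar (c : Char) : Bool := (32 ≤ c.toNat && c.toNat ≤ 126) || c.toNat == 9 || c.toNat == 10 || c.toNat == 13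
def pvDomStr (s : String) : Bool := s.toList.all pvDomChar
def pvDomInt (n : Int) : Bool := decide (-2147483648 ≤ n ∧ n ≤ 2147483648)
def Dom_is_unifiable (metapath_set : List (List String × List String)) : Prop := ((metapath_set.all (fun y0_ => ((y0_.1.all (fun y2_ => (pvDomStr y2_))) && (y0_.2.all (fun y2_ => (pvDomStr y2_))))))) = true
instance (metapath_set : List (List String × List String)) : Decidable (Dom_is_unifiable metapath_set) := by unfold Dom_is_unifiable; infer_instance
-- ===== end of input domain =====

-- B replaces A's count-dictionary + final scan with a single-pass seen-set duplicate
-- detector that early-exits on the first repeated node type (simpler; constant-factor faster).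

-- ===== PORT A =====
-- count dict built by the nested loops of A (defaultdict(int); d[t] += 1 is modify t 0 (+1))
def pvACounts (metapath_set : List (List String × List String)) : PySem.Dict String Int :=
  metapath_set.foldl
    (fun d mp => (PySem.Set.ofList mp.2).foldl (fun d t => d.modify t 0 (· + 1)) d)
    PySem.Dict.empty

def is_unifiable (metapath_set : List (List String × List String)) : Bool :=
  if metapath_set.length == 1 then false
  else (pvACounts metapath_set).values.any (fun i => decide ((2 : Int) ≤ i))

-- ===== PORT B =====
-- the for-loop with early `return True`, seen a Python set
def pvBLoop (metapath_set : List (List String × List String)) (seen : PySem.Set String) : Bool :=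
  match metapath_set with
  | [] => false
  | mp :: rest =>
    let unique := PySem.Set.ofList mp.2
    if unique.any (fun t => PySem.Set.contains seen t) then true
    else pvBLoop rest (PySem.Set.update seen unique)

def is_unifiable_alt (metapath_set : List (List String × List String)) : Bool :=
  pvBLoop metapath_set PySem.Set.empty

-- ===== PRECONDITION & SPEC =====
def Spec_is_unifiable (metapath_set : List (List String × List String)) (out : Bool) : Prop := out = is_unifiable_alt metapath_set
instance (metapath_set : List (List String × List String)) (out : Bool) : Decidable (Spec_is_unifiable metapath_set out) := by unfold Spec_is_unifiable; infer_instance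

-- ===== CLAIM (what is proved, stated in full; the proofs are below) =====
def Claim_equal_is_unifiable : Prop := ∀ (metapath_set : List (List String × List String)), Dom_is_unifiable metapath_set → Spec_is_unifiable metapath_set (is_unifiable metapath_set)

-- ===== LEMMAS AND PROOFS =====

-- number of metapaths whose node-type list contains t
def pvCnt (ms : List (List String × List String)) (t : String) : Nat :=
  ms.countP (fun mp => decide (t ∈ mp.2))

theorem pvSet_count (l : List String) (t : String) :
    (PySem.Set.ofList l).count t = if t ∈ l then 1 else 0 := by
  by_cases h : t ∈ l
  · rw [if_pos h]
    exact List.count_eq_one_of_mem (PySem.Set.nodup_ofList l) ((PySem.Set.mem_ofList _ _).2 h)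
  · simp [h, List.count_eq_zero.2 (fun hm => h ((PySem.Set.mem_ofList _ _).1 hm))]

theorem pvACounts_getD (ms : List (List String × List String)) (d : PySem.Dict String Int) (t : String) :
    (ms.foldl (fun d mp => (PySem.Set.ofList mp.2).foldl (fun d t => d.modify t 0 (· + 1)) d) d).getD t 0
      = d.getD t 0 + (pvCnt ms t : Int) := by
  induction ms generalizing d with
  | nil => simp [pvCnt]
  | cons mp rest ih =>
    simp only [List.foldl_cons, ih, PySem.Dict.getD_foldl_modify_add_one, pvSet_count, pvCnt,
      List.countP_cons]
    by_cases h : t ∈ mp.2 <;> simp [h] <;> omega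

theorem pvACounts_keys_mem (ms : List (List String × List String)) (d : PySem.Dict String Int) (t : String) :
    t ∈ (ms.foldl (fun d mp => (PySem.Set.ofList mp.2).foldl (fun d t => d.modify t 0 (· + 1)) d) d).keys
      ↔ t ∈ d.keys ∨ ∃ mp ∈ ms, t ∈ mp.2 := by
  induction ms generalizing d with
  | nil => simp
  | cons mp rest ih =>
    simp only [List.foldl_cons, ih, PySem.Dict.keys_foldl_modify, PySem.Set.mem_update,
      PySem.Set.mem_ofList, List.mem_cons]
    constructor
    · rintro (⟨h | h⟩ | ⟨m, hm, ht⟩)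
      · exact Or.inl h
      · exact Or.inr ⟨mp, Or.inl rfl, h⟩
      · exact Or.inr ⟨m, Or.inr hm, ht⟩
    · rintro (h | ⟨m, hm | hm, ht⟩)
      · exact Or.inl (Or.inl h)
      · exact Or.inl (Or.inr (hm ▸ ht))
      · exact Or.inr ⟨m, hm, ht⟩

theorem pvACounts_keys_nodup (ms : List (List String × List String)) (d : PySem.Dict String Int)
    (h : d.keys.Nodup) :
    (ms.foldl (fun d mp => (PySem.Set.ofList mp.2).foldl (fun d t => d.modify t 0 (· + 1)) d) d).keys.Nodup := by
  induction ms generalizing d with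
  | nil => exact h
  | cons mp rest ih =>
    apply ih
    rw [PySem.Dict.keys_foldl_modify]
    exact PySem.Set.nodup_update _ _ h

theorem pvACounts_getD' (ms : List (List String × List String)) (t : String) :
    (pvACounts ms).getD t 0 = (pvCnt ms t : Int) := by
  have h := pvACounts_getD ms PySem.Dict.empty t
  simpa [pvACounts, PySem.Dict.getD_empty] using h

-- A's any-over-values part characterised
theorem pvA_any_iff (ms : List (List String × List String)) :
    ((pvACounts ms).values.any (fun i => decide ((2 : Int) ≤ i)) = true)
      ↔ ∃ t, 2 ≤ pvCnt ms t := by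
  have hnd : (pvACounts ms).keys.Nodup :=
    pvACounts_keys_nodup ms PySem.Dict.empty (by simp)
  rw [PySem.Dict.values_eq_map_keys _ hnd 0]
  simp only [List.any_eq_true, List.mem_map]
  constructor
  · rintro ⟨v, ⟨k, hk, rfl⟩, hv⟩
    refine ⟨k, ?_⟩
    simp only [pvACounts_getD', decide_eq_true_eq] at hv
    omega
  · rintro ⟨t, ht⟩
    have hmem : t ∈ (pvACounts ms).keys := by
      rw [pvACounts, pvACounts_keys_mem]
      right
      have hp : 0 < pvCnt ms t := by omega
      rw [pvCnt, List.countP_pos_iff] at hp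
      obtain ⟨mp, hmp, hm⟩ := hp
      exact ⟨mp, hmp, by simpa using hm⟩
    refine ⟨(pvACounts ms).getD t 0, ⟨t, hmem, rfl⟩, ?_⟩
    simp only [pvACounts_getD', decide_eq_true_eq]
    omega

-- B's loop characterised by a seen-membership invariant
theorem pvB_iff (ms : List (List String × List String)) (seen : PySem.Set String) :
    pvBLoop ms seen = true ↔ ∃ t, 2 ≤ (if t ∈ seen then 1 else 0) + pvCnt ms t := by
  induction ms generalizing seen with
  | nil =>
    simp only [pvBLoop, pvCnt, List.countP_nil, Nat.add_zero]
    constructor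
    · intro h; cases h
    · rintro ⟨t, ht⟩; split_ifs at ht <;> omega
  | cons mp rest ih =>
    simp only [pvBLoop]
    by_cases hfound : (PySem.Set.ofList mp.2).any (fun t => PySem.Set.contains seen t) = true
    · simp only [hfound, if_true, true_iff]
      obtain ⟨t, htm, hts⟩ := List.any_eq_true.1 hfound
      have hseen : t ∈ seen := (PySem.Set.contains_iff _ _).1 hts
      have htl : t ∈ mp.2 := (PySem.Set.mem_ofList _ _).1 htm
      refine ⟨t, ?_⟩
      simp only [hseen, if_pos, pvCnt, List.countP_cons, htl]
      simp
      omega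
    · rw [Bool.not_eq_true] at hfound
      simp only [hfound, Bool.false_eq_true, if_false, ih]
      have hdisj : ∀ t ∈ mp.2, t ∉ seen := by
        intro t htl hts
        have : (PySem.Set.ofList mp.2).any (fun t => PySem.Set.contains seen t) = true :=
          List.any_eq_true.2 ⟨t, (PySem.Set.mem_ofList _ _).2 htl,
            (PySem.Set.contains_iff _ _).2 hts⟩
        rw [hfound] at this
        exact Bool.false_ne_true this
      apply exists_congr
      intro t
      have hmem : t ∈ PySem.Set.update seen (PySem.Set.ofList mp.2) ↔ t ∈ seen ∨ t ∈ mp.2 := by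
        rw [PySem.Set.mem_update]; simp [PySem.Set.mem_ofList]
      have hcnt : pvCnt (mp :: rest) t = (if t ∈ mp.2 then 1 else 0) + pvCnt rest t := by
        simp [pvCnt, List.countP_cons]
        by_cases h : t ∈ mp.2 <;> simp [h] <;> omega
      rw [hcnt]
      by_cases hm : t ∈ mp.2
      · have hns : t ∉ seen := hdisj t hm
        rw [if_pos (hmem.2 (Or.inr hm)), if_neg hns, if_pos hm]
        omega
      · by_cases hs : t ∈ seen
        · rw [if_pos (hmem.2 (Or.inl hs)), if_pos hs, if_neg hm]
          omega
        · rw [if_neg (fun h => (hmem.1 h).elim hs hm), if_neg hs, if_neg hm]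
          omega

theorem pvB_alt_iff (ms : List (List String × List String)) :
    is_unifiable_alt ms = true ↔ ∃ t, 2 ≤ pvCnt ms t := by
  rw [is_unifiable_alt, pvB_iff]
  apply exists_congr
  intro t
  simp [PySem.Set.empty]

-- ===== VERDICT (by name: the statement is the Claim_ definition above) =====
theorem is_unifiable_spec : Claim_equal_is_unifiable := by
  intro ms _
  unfold Spec_is_unifiable
  rw [is_unifiable]
  by_cases hlen : (ms.length == 1) = true
  · simp only [hlen, if_true]
    symm
    rw [Bool.eq_false_iff]
    intro hB
    obtain ⟨t, ht⟩ := (pvB_alt_iff ms).1 hB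
    have : pvCnt ms t ≤ ms.length := List.countP_le_length
    have h1 : ms.length = 1 := by simpa using hlen
    omega
  · rw [Bool.not_eq_true] at hlen
    simp only [hlen, Bool.false_eq_true, if_false]
    rw [Bool.eq_iff_iff, pvA_any_iff, pvB_alt_iff]
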